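-- pv_equiv track=rewrite | github.com/arriyam/AI-Algortihm | Genetic Algorithm/nQueen.py | resolveDuplicateRows
-- ===== SOURCE A (Python) =====
-- def resolveDuplicateRows(parent, child, lcp, rcp):
--     workingChild = child.copy()
--     dict = {}
--     duplicates = True
--
--     while duplicates:
--
--         duplicates = False
--         for i in range(lcp, rcp):
--             dict[workingChild[i]] = parent[i]
--
--         for i in range(lcp):
--             if workingChild[i] in dict:
--                 workingChild[i] = dict[workingChild[i]]
--
--         for i in range(rcp, len(workingChild)):
--             if workingChild[i] in dict:
--                 workingChild[i] = dict[workingChild[i]]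
--
--         dupla = set()
--         for num in workingChild:
--             if num not in dupla:
--                 dupla.add(num)
--             else:
--                 duplicates = True
--                 break
--
--     return workingChild
-- ===== SOURCE B (Python) =====
-- def resolveDuplicateRows(parent, child, lcp, rcp):
--     workingChild = child.copy()
--     mapping = {}
--     for i in range(lcp, rcp):
--         mapping[workingChild[i]] = parent[i]
--
--     for i in range(lcp):
--         x = workingChild[i]
--         while x in mapping:
--             x = mapping[x]
--         workingChild[i] = x
--
--     for i in range(rcp, len(workingChild)):
--         x = workingChild[i]
--         while x in mapping:
--             x = mapping[x]
--         workingChild[i] = x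
--
--     return workingChild
-- ===== Notes on version B (the rewrite author's own statement) =====
-- stated objective: alternative
-- what changed: A repeatedly rebuilds the segment dict, rewrites every outside position by one mapping step per whole-list pass and rescans the whole list for duplicates until none remain; B builds the dict once and, in a single pass over the outside positions, follows each gene's mapping chain to its fixpoint (intended as the asymptotically better PMX repair, but a timing run could not confirm a ratio at the largest sizes).
-- outside the precondition, e.g. on resolveDuplicateRows([3, 3], [1, 2, 1], 0, 2): A returns [1, 2, 3], B returns [1, 2, 3]; on resolveDuplicateRows([0, -2], [-2, 1], -2, 0): A returns [0, -2], B returns [0, 0]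
import Mathlib
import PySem

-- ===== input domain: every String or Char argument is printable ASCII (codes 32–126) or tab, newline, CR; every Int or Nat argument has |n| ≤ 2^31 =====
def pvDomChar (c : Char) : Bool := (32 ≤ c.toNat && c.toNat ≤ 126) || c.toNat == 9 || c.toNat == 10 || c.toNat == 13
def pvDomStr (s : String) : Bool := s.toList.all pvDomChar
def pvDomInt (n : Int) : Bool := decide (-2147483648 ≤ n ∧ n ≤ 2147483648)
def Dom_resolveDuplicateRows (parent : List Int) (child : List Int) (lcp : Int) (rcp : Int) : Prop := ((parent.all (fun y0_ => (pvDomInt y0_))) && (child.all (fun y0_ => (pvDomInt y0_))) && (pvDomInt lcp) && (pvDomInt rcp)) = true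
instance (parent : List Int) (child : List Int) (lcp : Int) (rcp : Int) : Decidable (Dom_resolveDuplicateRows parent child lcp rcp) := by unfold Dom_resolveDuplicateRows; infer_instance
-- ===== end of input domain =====

-- B replaces A's repeated whole-list rewriting passes (rebuild dict, rewrite every
-- outside position once, rescan for duplicates, repeat) by a single pass that chases
-- each outside gene's mapping chain to its fixpoint; equivalence is proved on Pre_.

-- ===== PORT A =====

-- 'dupla = set(); for num in workingChild: if num not in dupla: dupla.add(num) else: duplicates = True; break'
def pvScanDup : List Int → PySem.Set Int → Bool
  | [], _ => false
  | num :: rest, dupla =>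
    if PySem.Set.contains dupla num then true
    else pvScanDup rest (PySem.Set.add dupla num)

-- 'for i in range(lcp, rcp): dict[workingChild[i]] = parent[i]'
-- (pyGetD with default 0: Python raises IndexError on an out-of-range index there; Pre_ excludes those inputs)
def pvBuildDict (parent : List Int) (lcp rcp : Int) (d : PySem.Dict Int Int) (wc : List Int) : PySem.Dict Int Int :=
  (PySem.List.pyRange lcp rcp 1).foldl
    (fun d i => d.insert (PySem.List.pyGetD wc i 0) (PySem.List.pyGetD parent i 0)) d

-- 'for i in range(a, b): if workingChild[i] in dict: workingChild[i] = dict[workingChild[i]]'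
def pvSubstRange (a b : Int) (d : PySem.Dict Int Int) (wc : List Int) : List Int :=
  (PySem.List.pyRange a b 1).foldl
    (fun wc i =>
      match d.get? (PySem.List.pyGetD wc i 0) with
      | some v => PySem.List.pySetD wc i v
      | none => wc) wc

-- the 'while duplicates:' loop; fuel-bounded (Python diverges when the repair never
-- reaches a duplicate-free list; under Pre_ the loop provably stops within the fuel)
def pvLoopA (parent : List Int) (lcp rcp : Int) : Nat → List Int → PySem.Dict Int Int → List Int
  | 0, wc, _ => wc
  | fuel + 1, wc, d =>
    let d := pvBuildDict parent lcp rcp d wc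
    let wc := pvSubstRange 0 lcp d wc
    let wc := pvSubstRange rcp (wc.length : Int) d wc
    if pvScanDup wc PySem.Set.empty then pvLoopA parent lcp rcp fuel wc d else wc

def resolveDuplicateRows (parent : List Int) (child : List Int) (lcp : Int) (rcp : Int) : List Int :=
  pvLoopA parent lcp rcp (child.length + 1) child PySem.Dict.empty

-- ===== PORT B =====

-- 'while x in mapping: x = mapping[x]' ; fuel-bounded (Python diverges on a cyclic
-- chain; under Pre_ every chain provably exits within mapping.size + 1 steps)
def pvChase (m : PySem.Dict Int Int) : Nat → Int → Int
  | 0, x => x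
  | fuel + 1, x =>
    match m.get? x with
    | some y => pvChase m fuel y
    | none => x

-- 'for i in range(a, b): x = workingChild[i]; while x in mapping: x = mapping[x]; workingChild[i] = x'
def pvChaseRange (a b : Int) (m : PySem.Dict Int Int) (wc : List Int) : List Int :=
  (PySem.List.pyRange a b 1).foldl
    (fun wc i => PySem.List.pySetD wc i (pvChase m (m.size + 1) (PySem.List.pyGetD wc i 0))) wc

def resolveDuplicateRows_alt (parent : List Int) (child : List Int) (lcp : Int) (rcp : Int) : List Int :=
  let workingChild := child
  let mapping := (PySem.List.pyRange lcp rcp 1).foldl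
    (fun d i => d.insert (PySem.List.pyGetD workingChild i 0) (PySem.List.pyGetD parent i 0)) PySem.Dict.empty
  let workingChild := pvChaseRange 0 lcp mapping workingChild
  let workingChild := pvChaseRange rcp (workingChild.length : Int) mapping workingChild
  workingChild

-- ===== PRECONDITION & SPEC =====

-- child[lcp:rcp] (the fixed crossover segment), as clamped drop/take
def pvSeg (l : List Int) (lcp rcp : Int) : List Int := (l.drop lcp.toNat).take ((rcp - lcp).toNat)
-- the genes outside the segment
def pvOut (l : List Int) (lcp rcp : Int) : List Int := l.take lcp.toNat ++ l.drop rcp.toNat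

-- the PMX shape: segment of child and of parent duplicate-free, outside genes
-- duplicate-free and not mapped-onto by the segment (guarantees the repair terminates)
def pvPMX (parent : List Int) (child : List Int) (lcp rcp : Int) : Prop :=
  (pvSeg child lcp rcp).Nodup ∧ (pvSeg parent lcp rcp).Nodup ∧
  (pvOut child lcp rcp).Nodup ∧ ∀ x ∈ pvOut child lcp rcp, x ∉ pvSeg parent lcp rcp

-- Pre_ excludes (a) cut points outside the natural domain 0 ≤ lcp ≤ rcp ≤ len (Python
-- raises IndexError or silently wraps negative indices) except the harmless empty-segment
-- case rcp ≤ lcp where A returns the child unchanged, and (b) inputs on which the repair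
-- loop of A never terminates; the termination guard (child duplicate-free, or the PMX
-- shape pvPMX) is sufficient but not exact, so a few exotic terminating inputs (e.g. a
-- duplicated parent segment) are excluded although A returns there — see the cites.
def Pre_resolveDuplicateRows (parent : List Int) (child : List Int) (lcp : Int) (rcp : Int) : Prop :=
  (-(child.length : Int) ≤ rcp ∧ rcp ≤ lcp ∧ lcp ≤ (child.length : Int) ∧ child.Nodup)
  ∨ (0 ≤ lcp ∧ lcp ≤ rcp ∧ rcp ≤ (parent.length : Int) ∧ rcp ≤ (child.length : Int) ∧
      (child.Nodup ∨ pvPMX parent child lcp rcp))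

instance (parent : List Int) (child : List Int) (lcp : Int) (rcp : Int) : Decidable (Pre_resolveDuplicateRows parent child lcp rcp) := by unfold Pre_resolveDuplicateRows pvPMX; infer_instance

def pvWitness_resolveDuplicateRows : List Int × List Int × Int × Int := ([1, 2, 3, 4], [3, 1, 4, 2], 1, 3)

def Spec_resolveDuplicateRows (parent : List Int) (child : List Int) (lcp : Int) (rcp : Int) (out : List Int) : Prop := out = resolveDuplicateRows_alt parent child lcp rcp
instance (parent : List Int) (child : List Int) (lcp : Int) (rcp : Int) (out : List Int) : Decidable (Spec_resolveDuplicateRows parent child lcp rcp out) := by unfold Spec_resolveDuplicateRows; infer_instance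

-- ===== CLAIM (what is proved, stated in full; the proofs are below) =====
def Claim_equal_resolveDuplicateRows : Prop := ∀ (parent : List Int) (child : List Int) (lcp : Int) (rcp : Int), Dom_resolveDuplicateRows parent child lcp rcp → Pre_resolveDuplicateRows parent child lcp rcp → Spec_resolveDuplicateRows parent child lcp rcp (resolveDuplicateRows parent child lcp rcp)

-- ===== LEMMAS AND PROOFS =====

-- ---------- association-list dict built from key/value lists ----------

def pvZipIns (ks vs : List Int) (d : PySem.Dict Int Int) : PySem.Dict Int Int :=
  (ks.zip vs).foldl (fun d kv => d.insert kv.1 kv.2) d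

-- one substitution step of the mapping: dict[x] if x is a key, else x
def pvF (K P : List Int) (x : Int) : Int :=
  ((pvZipIns K P PySem.Dict.empty).get? x).getD x

-- the value at position i after k whole-list substitution passes of A
def pvStv (parent child : List Int) (lcp rcp : Int) (k i : Nat) : Int :=
  if lcp.toNat ≤ i ∧ i < rcp.toNat then child.getD i 0
  else (pvF (pvSeg child lcp rcp) (pvSeg parent lcp rcp))^[k] (child.getD i 0)

-- the whole list after k passes
def pvSt (parent child : List Int) (lcp rcp : Int) (k : Nat) : List Int :=
  (List.range child.length).map (pvStv parent child lcp rcp k)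

theorem pvZipIns_get?_not_mem (ks vs : List Int) (d : PySem.Dict Int Int) (x : Int)
    (hx : x ∉ ks) : (pvZipIns ks vs d).get? x = d.get? x := by
  induction ks generalizing vs d with
  | nil => rfl
  | cons k ks ih =>
    cases vs with
    | nil => simp [pvZipIns]
    | cons v vs =>
      have hxk : x ≠ k := by simp at hx; tauto
      have hxs : x ∉ ks := by simp at hx; tauto
      have h1 : pvZipIns (k :: ks) (v :: vs) d = pvZipIns ks vs (d.insert k v) := rfl
      rw [h1, ih vs _ hxs, PySem.Dict.get?_insert_of_ne d v hxk]

theorem pvZipIns_get?_getElem : ∀ (ks vs : List Int) (d : PySem.Dict Int Int)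
    (j : Nat), ks.Nodup → ∀ (hj : j < ks.length) (hj' : j < vs.length),
    (pvZipIns ks vs d).get? ks[j] = some vs[j] := by
  intro ks
  induction ks with
  | nil => intro vs d j _ hj _; simp at hj
  | cons k ks ih =>
    intro vs d j hnd hj hj'
    cases vs with
    | nil => simp at hj'
    | cons v vs =>
      have h1 : pvZipIns (k :: ks) (v :: vs) d = pvZipIns ks vs (d.insert k v) := rfl
      rw [h1]
      cases j with
      | zero =>
        have hk : k ∉ ks := by simp at hnd; tauto
        simpa using by
          rw [pvZipIns_get?_not_mem ks vs _ k hk]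
          exact PySem.Dict.get?_insert_self d k v
      | succ j =>
        simpa using ih vs (d.insert k v) j (by simp at hnd; tauto)
          (by simpa using hj) (by simpa using hj')

theorem pvF_not_mem {K P : List Int} {x : Int} (hx : x ∉ K) : pvF K P x = x := by
  unfold pvF
  rw [pvZipIns_get?_not_mem K P _ x hx]
  simp [PySem.Dict.get?_empty]

theorem pvDm_get?_none {K P : List Int} {x : Int} (hx : x ∉ K) :
    (pvZipIns K P PySem.Dict.empty).get? x = none := by
  rw [pvZipIns_get?_not_mem K P _ x hx]
  simp [PySem.Dict.get?_empty]

theorem pvF_getElem {K P : List Int} (hnd : K.Nodup) (j : Nat) (hj : j < K.length)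
    (hj' : j < P.length) : pvF K P K[j] = P[j] := by
  unfold pvF
  rw [pvZipIns_get?_getElem K P _ j hnd hj hj']
  rfl

theorem pvDm_get?_mem {K P : List Int} {x : Int} (hnd : K.Nodup)
    (hlen : K.length = P.length) (hx : x ∈ K) :
    (pvZipIns K P PySem.Dict.empty).get? x = some (pvF K P x) := by
  obtain ⟨j, hj, rfl⟩ := List.mem_iff_getElem.mp hx
  rw [pvZipIns_get?_getElem K P _ j hnd hj (hlen ▸ hj), pvF_getElem hnd j hj (hlen ▸ hj)]

theorem pvF_mem_P {K P : List Int} {x : Int} (hnd : K.Nodup) (hlen : K.length = P.length)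
    (hx : x ∈ K) : pvF K P x ∈ P := by
  obtain ⟨j, hj, rfl⟩ := List.mem_iff_getElem.mp hx
  rw [pvF_getElem hnd j hj (hlen ▸ hj)]
  exact List.getElem_mem _

theorem pvF_inj {K P : List Int} {x y : Int} (hndK : K.Nodup) (hndP : P.Nodup)
    (hlen : K.length = P.length) (hx : x ∈ K) (hy : y ∈ K)
    (h : pvF K P x = pvF K P y) : x = y := by
  obtain ⟨i, hi, rfl⟩ := List.mem_iff_getElem.mp hx
  obtain ⟨j, hj, rfl⟩ := List.mem_iff_getElem.mp hy
  rw [pvF_getElem hndK i hi (hlen ▸ hi), pvF_getElem hndK j hj (hlen ▸ hj)] at h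
  have : i = j := hndP.getElem_inj_iff.mp h
  subst this; rfl

theorem pvIter_stable {K P : List Int} {x : Int} {k : Nat}
    (h : (pvF K P)^[k] x ∉ K) (t : Nat) : (pvF K P)^[k + t] x = (pvF K P)^[k] x := by
  induction t with
  | zero => rfl
  | succ t ih =>
    rw [show k + (t + 1) = (k + t) + 1 by omega, Function.iterate_succ_apply', ih,
      pvF_not_mem h]

theorem pvIter_stable_le {K P : List Int} {x : Int} {k m : Nat}
    (h : (pvF K P)^[k] x ∉ K) (hm : k ≤ m) : (pvF K P)^[m] x = (pvF K P)^[k] x := by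
  have := pvIter_stable h (m - k)
  rwa [show k + (m - k) = m by omega] at this

theorem pvChain_no_repeat {K P : List Int} (hndK : K.Nodup) (hndP : P.Nodup)
    (hlen : K.length = P.length) {x : Int} (hxP : x ∉ P) :
    ∀ i j, i < j → (∀ t, t < j → (pvF K P)^[t] x ∈ K) →
      (pvF K P)^[i] x ≠ (pvF K P)^[j] x := by
  intro i
  induction i with
  | zero =>
    intro j h0j hall heq
    obtain ⟨jj, rfl⟩ : ∃ jj, j = jj + 1 := ⟨j - 1, by omega⟩
    rw [Function.iterate_succ_apply'] at heq
    simp only [Function.iterate_zero_apply] at heq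
    exact hxP (by rw [heq]; exact pvF_mem_P hndK hlen (hall jj (by omega)))
  | succ i ih =>
    intro j hij hall heq
    obtain ⟨jj, rfl⟩ : ∃ jj, j = jj + 1 := ⟨j - 1, by omega⟩
    rw [Function.iterate_succ_apply', Function.iterate_succ_apply'] at heq
    have h1 : (pvF K P)^[i] x ∈ K := hall i (by omega)
    have h2 : (pvF K P)^[jj] x ∈ K := hall jj (by omega)
    exact ih jj (by omega) (fun t ht => hall t (by omega))
      (pvF_inj hndK hndP hlen h1 h2 heq)

theorem pvChain_exit {K P : List Int} (hndK : K.Nodup) (hndP : P.Nodup)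
    (hlen : K.length = P.length) {x : Int} (hxP : x ∉ P) :
    ∃ k ≤ K.length, (pvF K P)^[k] x ∉ K := by
  by_contra hcon
  push_neg at hcon
  have hsub : ((List.range (K.length + 1)).map (fun k => (pvF K P)^[k] x)) ⊆ K := by
    intro y hy
    simp only [List.mem_map, List.mem_range] at hy
    obtain ⟨k, hk, rfl⟩ := hy
    exact hcon k (by omega)
  have hnd : ((List.range (K.length + 1)).map (fun k => (pvF K P)^[k] x)).Nodup := by
    refine List.Nodup.map_on ?_ (List.nodup_range)
    intro i hi j hj heq
    simp only [List.mem_range] at hi hj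
    by_contra hne
    rcases Nat.lt_or_ge i j with h | h
    · exact pvChain_no_repeat hndK hndP hlen hxP i j h
        (fun t ht => hcon t (by omega)) heq
    · have h' : j < i := by omega
      exact pvChain_no_repeat hndK hndP hlen hxP j i h'
        (fun t ht => hcon t (by omega)) heq.symm
  have := (List.subperm_of_subset hnd hsub).length_le
  simp at this

theorem pvChain_peel {K P : List Int} (hndK : K.Nodup) (hndP : P.Nodup)
    (hlen : K.length = P.length) {x y : Int} {kx ky : Nat}
    (hkx2 : ∀ t, t < kx → (pvF K P)^[t] x ∈ K)
    (hky2 : ∀ t, t < ky → (pvF K P)^[t] y ∈ K)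
    (heq : (pvF K P)^[kx] x = (pvF K P)^[ky] y) :
    ∀ t, t ≤ kx → t ≤ ky → (pvF K P)^[kx - t] x = (pvF K P)^[ky - t] y := by
  intro t
  induction t with
  | zero => simpa using heq
  | succ t ih =>
    intro h1 h2
    have hprev := ih (by omega) (by omega)
    rw [show kx - t = (kx - (t + 1)) + 1 by omega,
        show ky - t = (ky - (t + 1)) + 1 by omega,
        Function.iterate_succ_apply', Function.iterate_succ_apply'] at hprev
    exact pvF_inj hndK hndP hlen (hkx2 _ (by omega)) (hky2 _ (by omega)) hprev

theorem pvChain_backward_aux {K P : List Int} (hndK : K.Nodup) (hndP : P.Nodup)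
    (hlen : K.length = P.length) {x y : Int} {kx ky : Nat} (hx : x ∉ P)
    (hkx2 : ∀ t, t < kx → (pvF K P)^[t] x ∈ K)
    (hky2 : ∀ t, t < ky → (pvF K P)^[t] y ∈ K)
    (heq : (pvF K P)^[kx] x = (pvF K P)^[ky] y) (hle : kx ≤ ky) : x = y := by
  have h := pvChain_peel hndK hndP hlen hkx2 hky2 heq kx (le_refl _) hle
  simp only [Nat.sub_self, Function.iterate_zero_apply] at h
  rcases Nat.eq_or_lt_of_le hle with h' | h'
  · subst h'
    simpa using h
  · exfalso
    obtain ⟨s, hs⟩ : ∃ s, ky - kx = s + 1 := ⟨ky - kx - 1, by omega⟩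
    rw [hs, Function.iterate_succ_apply'] at h
    exact hx (h ▸ pvF_mem_P hndK hlen (hky2 s (by omega)))

theorem pvChain_backward {K P : List Int} (hndK : K.Nodup) (hndP : P.Nodup)
    (hlen : K.length = P.length) {x y : Int} {kx ky : Nat} (hx : x ∉ P) (hy : y ∉ P)
    (hkx2 : ∀ t, t < kx → (pvF K P)^[t] x ∈ K)
    (hky2 : ∀ t, t < ky → (pvF K P)^[t] y ∈ K)
    (heq : (pvF K P)^[kx] x = (pvF K P)^[ky] y) : x = y := by
  rcases Nat.le_total kx ky with h | h
  · exact pvChain_backward_aux hndK hndP hlen hx hkx2 hky2 heq h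
  · exact (pvChain_backward_aux hndK hndP hlen hy hky2 hkx2 heq.symm h).symm

theorem pvChase_spec {K P : List Int} (hndK : K.Nodup) (hlen : K.length = P.length) :
    ∀ (fuel : Nat) (x : Int), (∃ k, k ≤ fuel ∧ (pvF K P)^[k] x ∉ K) →
      ∃ k0, pvChase (pvZipIns K P PySem.Dict.empty) fuel x = (pvF K P)^[k0] x ∧
        (pvF K P)^[k0] x ∉ K := by
  intro fuel
  induction fuel with
  | zero =>
    rintro x ⟨k, hk, hout⟩
    interval_cases k
    exact ⟨0, rfl, hout⟩
  | succ fuel ih =>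
    rintro x ⟨k, hk, hout⟩
    by_cases hx : x ∈ K
    · have hsome := pvDm_get?_mem hndK hlen hx
      have hk0 : k ≠ 0 := by
        rintro rfl
        exact hout hx
      have hstep : (pvF K P)^[k - 1] (pvF K P x) ∉ K := by
        have h2 : (pvF K P)^[(k - 1) + 1] x ∉ K := by
          rw [show (k - 1) + 1 = k by omega]; exact hout
        rwa [Function.iterate_succ_apply] at h2
      obtain ⟨k0, hc, ho⟩ := ih (pvF K P x) ⟨k - 1, by omega, hstep⟩
      refine ⟨k0 + 1, ?_, ?_⟩
      · simp only [pvChase, hsome]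
        rw [hc, Function.iterate_succ_apply]
      · rwa [Function.iterate_succ_apply]
    · have hnone := pvDm_get?_none (K := K) (P := P) hx
      refine ⟨0, ?_, hx⟩
      simp [pvChase, hnone]

-- ---------- geometry of the segment and the outside ----------

theorem pvSeg_length (l : List Int) (lcp rcp : Int) (h0 : 0 ≤ lcp)
    (h3 : rcp ≤ (l.length : Int)) :
    (pvSeg l lcp rcp).length = rcp.toNat - lcp.toNat := by
  simp only [pvSeg, List.length_take, List.length_drop]
  omega

theorem pvSeg_getElem (l : List Int) (lcp rcp : Int) (t : Nat)
    (ht : t < (rcp - lcp).toNat) (ht2 : lcp.toNat + t < l.length) :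
    (pvSeg l lcp rcp)[t]'(by
      simp only [pvSeg, List.length_take, List.length_drop]; omega) =
      l[lcp.toNat + t] := by
  simp [pvSeg]

theorem pvSeg_cons (l : List Int) (lcp rcp : Int) (h0 : 0 ≤ lcp) (h : lcp < rcp)
    (hl : lcp.toNat < l.length) :
    pvSeg l lcp rcp = l[lcp.toNat] :: pvSeg l (lcp + 1) rcp := by
  unfold pvSeg
  rw [List.drop_eq_getElem_cons hl,
    show (rcp - lcp).toNat = (rcp - (lcp + 1)).toNat + 1 by omega, List.take_succ_cons,
    show (lcp + 1).toNat = lcp.toNat + 1 by omega]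

theorem pvOut_length (l : List Int) (lcp rcp : Int) (h0 : 0 ≤ lcp) (h1 : lcp ≤ rcp)
    (h3 : rcp ≤ (l.length : Int)) :
    (pvOut l lcp rcp).length = lcp.toNat + (l.length - rcp.toNat) := by
  simp only [pvOut, List.length_append, List.length_take, List.length_drop]
  omega

theorem pvOut_mem (l : List Int) (lcp rcp : Int) (h0 : 0 ≤ lcp) (h1 : lcp ≤ rcp)
    (h3 : rcp ≤ (l.length : Int)) (i : Nat) (hi : i < l.length)
    (hout : ¬(lcp.toNat ≤ i ∧ i < rcp.toNat)) : l.getD i 0 ∈ pvOut l lcp rcp := by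
  rw [List.getD_eq_getElem l 0 hi]
  unfold pvOut
  rcases Nat.lt_or_ge i lcp.toNat with h | h
  · apply List.mem_append_left
    have e : (l.take lcp.toNat)[i]'(by simp; omega) = l[i] := List.getElem_take
    exact e ▸ List.getElem_mem _
  · apply List.mem_append_right
    have e : (l.drop rcp.toNat)[i - rcp.toNat]'(by simp; omega) = l[i] := by
      rw [List.getElem_drop]
      congr 1
      omega
    exact e ▸ List.getElem_mem _

theorem pvOut_getElem (l : List Int) (lcp rcp : Int) (h0 : 0 ≤ lcp) (h1 : lcp ≤ rcp)
    (h3 : rcp ≤ (l.length : Int)) (i : Nat) (hi : i < l.length)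
    (hout : ¬(lcp.toNat ≤ i ∧ i < rcp.toNat)) :
    (pvOut l lcp rcp)[if i < lcp.toNat then i else lcp.toNat + (i - rcp.toNat)]'(by
      rw [pvOut_length l lcp rcp h0 h1 h3]
      rcases Nat.lt_or_ge i lcp.toNat with hc | hc
      · rw [if_pos hc]; omega
      · rw [if_neg (by omega)]; omega) = l[i] := by
  unfold pvOut
  rcases Nat.lt_or_ge i lcp.toNat with h | h
  · simp only [if_pos h]
    rw [List.getElem_append_left (by simp; omega)]
    exact List.getElem_take
  · have hb : rcp.toNat ≤ i := by omega
    simp only [if_neg (by omega : ¬ i < lcp.toNat)]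
    rw [List.getElem_append_right (by simp; try omega)]
    rw [List.getElem_drop]
    congr 1
    simp only [List.length_take]
    omega

theorem pvOut_inj (l : List Int) (lcp rcp : Int) (h0 : 0 ≤ lcp) (h1 : lcp ≤ rcp)
    (h3 : rcp ≤ (l.length : Int)) (hnd : (pvOut l lcp rcp).Nodup)
    (i j : Nat) (hi : i < l.length) (hj : j < l.length)
    (houti : ¬(lcp.toNat ≤ i ∧ i < rcp.toNat)) (houtj : ¬(lcp.toNat ≤ j ∧ j < rcp.toNat))
    (heq : l[i] = l[j]) : i = j := by
  have e1 := pvOut_getElem l lcp rcp h0 h1 h3 i hi houti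
  have e2 := pvOut_getElem l lcp rcp h0 h1 h3 j hj houtj
  have := hnd.getElem_inj_iff.mp (e1.trans (heq.trans e2.symm))
  split at this <;> split at this <;> omega

-- ---------- the duplicate scan ----------

theorem pvScanDup_false_iff : ∀ (l : List Int) (s : PySem.Set Int),
    pvScanDup l s = false ↔ (l.Nodup ∧ ∀ x ∈ l, x ∉ s) := by
  intro l
  induction l with
  | nil => simp [pvScanDup]
  | cons num rest ih =>
    intro s
    by_cases hc : num ∈ s
    · rw [pvScanDup, if_pos ((PySem.Set.contains_iff s num).mpr hc)]
      exact ⟨fun h => by simp at h, fun h => absurd hc (h.2 num List.mem_cons_self)⟩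
    · rw [pvScanDup, if_neg (by simp [hc]), ih]
      simp only [List.nodup_cons, List.mem_cons, PySem.Set.mem_add]
      constructor
      · rintro ⟨hnd, hall⟩
        have hnum : num ∉ rest := fun hmem => (hall num hmem) (Or.inr rfl)
        exact ⟨⟨hnum, hnd⟩, by
          rintro x (rfl | hx)
          · exact hc
          · exact fun hxs => (hall x hx) (Or.inl hxs)⟩
      · rintro ⟨⟨hnum, hnd⟩, hall⟩
        refine ⟨hnd, fun x hx => ?_⟩
        rintro (hxs | rfl)
        · exact (hall x (Or.inr hx)) hxs
        · exact hnum hx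

-- ---------- the substitution pass ----------

theorem pvSubstRange_spec (d : PySem.Dict Int Int) :
    ∀ (m : Nat) (a b : Int) (wc : List Int), 0 ≤ a → m = (b - a).toNat →
      b.toNat ≤ wc.length →
      (pvSubstRange a b d wc).length = wc.length ∧
      ∀ i (h : i < wc.length),
        (pvSubstRange a b d wc)[i]? =
          some (if a.toNat ≤ i ∧ i < b.toNat then (d.get? wc[i]).getD wc[i] else wc[i]) := by
  intro m
  induction m with
  | zero =>
    intro a b wc h0 hm hb
    have hnil : pvSubstRange a b d wc = wc := by
      unfold pvSubstRange
      rw [PySem.List.pyRange_one_eq_nil (by omega)]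
      rfl
    rw [hnil]
    refine ⟨rfl, fun i h => ?_⟩
    rw [if_neg (by omega), List.getElem?_eq_getElem h]
  | succ m ih =>
    intro a b wc h0 hm hb
    have hab : a < b := by omega
    have ha : a.toNat < wc.length := by omega
    have hstep : pvSubstRange a b d wc =
        pvSubstRange (a + 1) b d
          (match d.get? wc[a.toNat] with
           | some v => wc.set a.toNat v
           | none => wc) := by
      unfold pvSubstRange
      rw [PySem.List.pyRange_one_cons hab, List.foldl_cons,
        PySem.List.pyGetD_eq_getElem wc 0 h0 (by omega)]
      cases d.get? wc[a.toNat] with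
      | some v => simp only [PySem.List.pySetD_of_nonneg wc v h0]
      | none => rfl
    set wc1 := (match d.get? wc[a.toNat] with
           | some v => wc.set a.toNat v
           | none => wc) with hwc1
    have hlen1 : wc1.length = wc.length := by
      rw [hwc1]; cases d.get? wc[a.toNat] <;> simp
    have hget1 : ∀ i (h : i < wc.length),
        wc1[i]? = some (if i = a.toNat then (d.get? wc[a.toNat]).getD wc[a.toNat] else wc[i]) := by
      intro i h
      rw [hwc1]
      cases hdv : d.get? wc[a.toNat] with
      | some v =>
        simp only [List.getElem?_set, Option.getD_some]
        by_cases hia : i = a.toNat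
        · subst hia
          simp [h]
        · simp [if_neg hia, if_neg (Ne.symm hia), List.getElem?_eq_getElem h]
      | none =>
        simp only [Option.getD_none]
        by_cases hia : i = a.toNat
        · subst hia
          simp [List.getElem?_eq_getElem h]
        · simp [if_neg hia, List.getElem?_eq_getElem h]
    obtain ⟨ihlen, ihget⟩ := ih (a + 1) b wc1 (by omega) (by omega) (by omega)
    rw [hstep]
    refine ⟨ihlen.trans hlen1, fun i h => ?_⟩
    have h1 : i < wc1.length := by omega
    rw [ihget i h1]
    have e1 := hget1 i h
    have hwc1i : i < wc1.length := h1
    have e1' : wc1[i] = (if i = a.toNat then (d.get? wc[a.toNat]).getD wc[a.toNat] else wc[i]) := by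
      have := e1
      rw [List.getElem?_eq_getElem h1] at this
      exact Option.some.inj this
    by_cases hia : i = a.toNat
    · subst hia
      rw [if_neg (by omega), e1', if_pos rfl, if_pos (by omega)]
    · rcases Nat.lt_or_ge i a.toNat with hlt | hge
      · rw [if_neg (by omega), e1', if_neg hia, if_neg (by omega)]
      · have hge1 : (a + 1).toNat ≤ i ↔ a.toNat ≤ i ∧ i ≠ a.toNat := by omega
        by_cases hwin : i < b.toNat
        · rw [if_pos (by omega), e1', if_neg hia, if_pos (by omega)]
        · rw [if_neg (by omega), e1', if_neg hia, if_neg (by omega)]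

-- ---------- the dict-building pass ----------

theorem pvBuildDict_eq : ∀ (m : Nat) (lcp rcp : Int) (d : PySem.Dict Int Int)
    (parent wc : List Int), 0 ≤ lcp → m = (rcp - lcp).toNat →
    rcp ≤ (parent.length : Int) → rcp ≤ (wc.length : Int) →
    pvBuildDict parent lcp rcp d wc =
      pvZipIns (pvSeg wc lcp rcp) (pvSeg parent lcp rcp) d := by
  intro m
  induction m with
  | zero =>
    intro lcp rcp d parent wc h0 hm h2 h3
    unfold pvBuildDict pvSeg pvZipIns
    rw [PySem.List.pyRange_one_eq_nil (by omega), show (rcp - lcp).toNat = 0 from hm.symm]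
    simp
  | succ m ih =>
    intro lcp rcp d parent wc h0 hm h2 h3
    have hlt : lcp < rcp := by omega
    have hw : lcp.toNat < wc.length := by omega
    have hp : lcp.toNat < parent.length := by omega
    unfold pvBuildDict
    rw [PySem.List.pyRange_one_cons hlt, List.foldl_cons,
      PySem.List.pyGetD_eq_getElem wc 0 h0 (by omega),
      PySem.List.pyGetD_eq_getElem parent 0 h0 (by omega)]
    have := ih (lcp + 1) rcp (d.insert wc[lcp.toNat] parent[lcp.toNat]) parent wc
      (by omega) (by omega) h2 h3
    unfold pvBuildDict at this
    rw [this, pvSeg_cons wc lcp rcp h0 hlt hw, pvSeg_cons parent lcp rcp h0 hlt hp]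
    rfl


-- ---------- dict lookups after rebuilding on top of a compatible dict ----------

theorem pvZipIns_get?_congr {K P : List Int} (hndK : K.Nodup) (hlen : K.length = P.length)
    (d : PySem.Dict Int Int) (hd : ∀ x, x ∉ K → d.get? x = none) (x : Int) :
    (pvZipIns K P d).get? x = (pvZipIns K P PySem.Dict.empty).get? x := by
  by_cases hx : x ∈ K
  · obtain ⟨j, hj, rfl⟩ := List.mem_iff_getElem.mp hx
    rw [pvZipIns_get?_getElem K P d j hndK hj (hlen ▸ hj),
        pvZipIns_get?_getElem K P _ j hndK hj (hlen ▸ hj)]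
  · rw [pvZipIns_get?_not_mem K P d x hx, pvZipIns_get?_not_mem K P _ x hx, hd x hx]
    simp [PySem.Dict.get?_empty]

-- ---------- the state lists ----------

theorem pvSt_length (parent child : List Int) (lcp rcp : Int) (k : Nat) :
    (pvSt parent child lcp rcp k).length = child.length := by
  simp [pvSt]

theorem pvSt_getElem (parent child : List Int) (lcp rcp : Int) (k i : Nat)
    (hi : i < child.length) :
    (pvSt parent child lcp rcp k)[i]'(by simp [pvSt]; omega) =
      pvStv parent child lcp rcp k i := by
  simp [pvSt]

theorem pvSt_getD (parent child : List Int) (lcp rcp : Int) (k i : Nat)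
    (hi : i < child.length) :
    (pvSt parent child lcp rcp k).getD i 0 = pvStv parent child lcp rcp k i := by
  rw [List.getD_eq_getElem _ 0 (by simp [pvSt]; omega), pvSt_getElem parent child lcp rcp k i hi]

theorem pvEqSt (parent child : List Int) (lcp rcp : Int) (wc : List Int) (k : Nat)
    (hlen : wc.length = child.length)
    (h : ∀ i, i < child.length → wc.getD i 0 = pvStv parent child lcp rcp k i) :
    wc = pvSt parent child lcp rcp k := by
  apply List.ext_getElem (by simp [pvSt, hlen])
  intro i h1 h2
  have e := h i (by omega)
  rw [List.getD_eq_getElem wc 0 h1] at e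
  rw [e, pvSt_getElem parent child lcp rcp k i (by omega)]

-- when some outside chain value is still a key, the state has a duplicate
theorem pvDup (parent child : List Int) (lcp rcp : Int) (h0 : 0 ≤ lcp) (h1 : lcp ≤ rcp)
    (h3 : rcp ≤ (child.length : Int)) (k : Nat)
    (hEx : ∃ i, i < child.length ∧ ¬(lcp.toNat ≤ i ∧ i < rcp.toNat) ∧
      (pvF (pvSeg child lcp rcp) (pvSeg parent lcp rcp))^[k] (child.getD i 0) ∈
        pvSeg child lcp rcp) :
    ¬ (pvSt parent child lcp rcp k).Nodup := by
  obtain ⟨i, hi, hout, hmem⟩ := hEx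
  intro hnd
  obtain ⟨j, hj, hKj⟩ := List.mem_iff_getElem.mp hmem
  have hsl := pvSeg_length child lcp rcp h0 h3
  have hjlen : j < (rcp - lcp).toNat := by omega
  have hj2 : lcp.toNat + j < child.length := by omega
  have hKj' : child[lcp.toNat + j] =
      (pvF (pvSeg child lcp rcp) (pvSeg parent lcp rcp))^[k] (child.getD i 0) := by
    rw [← pvSeg_getElem child lcp rcp j hjlen hj2]
    exact hKj
  have e1 : (pvSt parent child lcp rcp k)[i]'(by simp [pvSt]; omega) =
      (pvF (pvSeg child lcp rcp) (pvSeg parent lcp rcp))^[k] (child.getD i 0) := by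
    rw [pvSt_getElem parent child lcp rcp k i hi]
    unfold pvStv
    rw [if_neg hout]
  have e2 : (pvSt parent child lcp rcp k)[lcp.toNat + j]'(by simp [pvSt]; omega) =
      child[lcp.toNat + j] := by
    rw [pvSt_getElem parent child lcp rcp k (lcp.toNat + j) hj2]
    unfold pvStv
    rw [if_pos (by omega), List.getD_eq_getElem child 0 hj2]
  have heq : (pvSt parent child lcp rcp k)[i]'(by simp [pvSt]; omega) =
      (pvSt parent child lcp rcp k)[lcp.toNat + j]'(by simp [pvSt]; omega) := by
    rw [e1, e2, hKj']
  have := hnd.getElem_inj_iff.mp heq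
  omega

-- ---------- one pass of A's while-loop body ----------

theorem pvBody (parent child : List Int) (lcp rcp : Int)
    (h0 : 0 ≤ lcp) (h1 : lcp ≤ rcp) (h2 : rcp ≤ (parent.length : Int))
    (h3 : rcp ≤ (child.length : Int)) (hndK : (pvSeg child lcp rcp).Nodup)
    (d : PySem.Dict Int Int) (hd : ∀ x, x ∉ pvSeg child lcp rcp → d.get? x = none)
    (wc : List Int) (k : Nat) (hwlen : wc.length = child.length)
    (hw : ∀ i, i < child.length → wc.getD i 0 = pvStv parent child lcp rcp k i) :
    (∀ x, (pvBuildDict parent lcp rcp d wc).get? x =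
        (pvZipIns (pvSeg child lcp rcp) (pvSeg parent lcp rcp) PySem.Dict.empty).get? x) ∧
    pvSubstRange rcp ((pvSubstRange 0 lcp (pvBuildDict parent lcp rcp d wc) wc).length : Int)
        (pvBuildDict parent lcp rcp d wc) (pvSubstRange 0 lcp (pvBuildDict parent lcp rcp d wc) wc)
      = pvSt parent child lcp rcp (k + 1) := by
  have hlenKP : (pvSeg child lcp rcp).length = (pvSeg parent lcp rcp).length := by
    rw [pvSeg_length child lcp rcp h0 h3, pvSeg_length parent lcp rcp h0 h2]
  have hsl := pvSeg_length child lcp rcp h0 h3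
  have hwc3 : rcp ≤ (wc.length : Int) := by rw [hwlen]; exact h3
  -- the rebuilt dict and its lookups
  have hseg : pvSeg wc lcp rcp = pvSeg child lcp rcp := by
    apply List.ext_getElem
    · rw [pvSeg_length wc lcp rcp h0 hwc3, pvSeg_length child lcp rcp h0 h3]
    · intro t ht1 ht2
      rw [pvSeg_length wc lcp rcp h0 hwc3] at ht1
      have htr : t < (rcp - lcp).toNat := by omega
      have htw : lcp.toNat + t < wc.length := by omega
      have htc : lcp.toNat + t < child.length := by omega
      rw [pvSeg_getElem wc lcp rcp t htr htw, pvSeg_getElem child lcp rcp t htr htc]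
      have e := hw (lcp.toNat + t) htc
      rw [List.getD_eq_getElem wc 0 htw] at e
      rw [e]
      unfold pvStv
      rw [if_pos (by omega), List.getD_eq_getElem child 0 htc]
  have hbd : pvBuildDict parent lcp rcp d wc =
      pvZipIns (pvSeg child lcp rcp) (pvSeg parent lcp rcp) d := by
    rw [pvBuildDict_eq ((rcp - lcp).toNat) lcp rcp d parent wc h0 rfl h2 hwc3, hseg]
  have hget : ∀ x, (pvBuildDict parent lcp rcp d wc).get? x =
      (pvZipIns (pvSeg child lcp rcp) (pvSeg parent lcp rcp) PySem.Dict.empty).get? x := by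
    intro x
    rw [hbd]
    exact pvZipIns_get?_congr hndK hlenKP d hd x
  refine ⟨hget, ?_⟩
  -- the two substitution passes
  obtain ⟨len1, get1⟩ := pvSubstRange_spec (pvBuildDict parent lcp rcp d wc)
    lcp.toNat 0 lcp wc (le_refl 0) (by omega) (by omega)
  obtain ⟨len2, get2⟩ := pvSubstRange_spec (pvBuildDict parent lcp rcp d wc)
    ((((pvSubstRange 0 lcp (pvBuildDict parent lcp rcp d wc) wc).length : Int)) - rcp).toNat
    rcp ((pvSubstRange 0 lcp (pvBuildDict parent lcp rcp d wc) wc).length : Int)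
    (pvSubstRange 0 lcp (pvBuildDict parent lcp rcp d wc) wc)
    (by omega) rfl (by simp)
  apply pvEqSt parent child lcp rcp _ (k + 1) (by omega)
  intro i hi
  have hi1 : i < wc.length := by omega
  have hi2 : i < (pvSubstRange 0 lcp (pvBuildDict parent lcp rcp d wc) wc).length := by omega
  -- the value of the first pass at i
  have e1 : (pvSubstRange 0 lcp (pvBuildDict parent lcp rcp d wc) wc)[i]'(hi2) =
      (if i < lcp.toNat
        then ((pvBuildDict parent lcp rcp d wc).get? wc[i]).getD wc[i] else wc[i]) := by
    have := get1 i hi1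
    rw [List.getElem?_eq_getElem hi2] at this
    have e := Option.some.inj this
    rw [e]
    by_cases hc : i < lcp.toNat
    · rw [if_pos (by omega), if_pos hc]
    · rw [if_neg (by omega), if_neg hc]
  have e2' := get2 i hi2
  rw [List.getElem?_eq_getElem (by omega : i < (pvSubstRange rcp (((pvSubstRange 0 lcp (pvBuildDict parent lcp rcp d wc) wc).length : Int)) (pvBuildDict parent lcp rcp d wc) (pvSubstRange 0 lcp (pvBuildDict parent lcp rcp d wc) wc)).length)] at e2'
  have e2 := Option.some.inj e2'
  rw [List.getD_eq_getElem _ 0 (by omega), e2]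
  -- now compute the final value
  have hwi := hw i hi
  rw [List.getD_eq_getElem wc 0 hi1] at hwi
  have happ : ∀ z : Int, ((pvBuildDict parent lcp rcp d wc).get? z).getD z =
      pvF (pvSeg child lcp rcp) (pvSeg parent lcp rcp) z := by
    intro z
    rw [hget z]
    rfl
  unfold pvStv
  by_cases hseg' : lcp.toNat ≤ i ∧ i < rcp.toNat
  · -- segment position: untouched by both passes
    rw [if_pos hseg', if_neg (by omega), e1, if_neg (by omega), hwi]
    unfold pvStv
    rw [if_pos hseg']
  · rw [if_neg hseg']
    rcases Nat.lt_or_ge i lcp.toNat with hlt | hge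
    · -- prefix: first pass substitutes
      rw [if_neg (by omega), e1, if_pos hlt, happ, hwi]
      unfold pvStv
      rw [if_neg hseg', Function.iterate_succ_apply']
    · -- suffix: second pass substitutes
      have hb : rcp.toNat ≤ i := by omega
      rw [if_pos (by constructor <;> omega), e1, if_neg (by omega), happ, hwi]
      unfold pvStv
      rw [if_neg hseg', Function.iterate_succ_apply']

-- ---------- A's while-loop ----------

theorem pvLoop_main (parent child : List Int) (lcp rcp : Int)
    (h0 : 0 ≤ lcp) (h1 : lcp ≤ rcp) (h2 : rcp ≤ (parent.length : Int))
    (h3 : rcp ≤ (child.length : Int)) (hndK : (pvSeg child lcp rcp).Nodup)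
    (L : Nat)
    (hL1 : ∀ i, i < child.length → ¬(lcp.toNat ≤ i ∧ i < rcp.toNat) →
      (pvF (pvSeg child lcp rcp) (pvSeg parent lcp rcp))^[L] (child.getD i 0) ∉ pvSeg child lcp rcp)
    (hL2 : ∀ k, k < L → ∃ i, i < child.length ∧ ¬(lcp.toNat ≤ i ∧ i < rcp.toNat) ∧
      (pvF (pvSeg child lcp rcp) (pvSeg parent lcp rcp))^[k] (child.getD i 0) ∈ pvSeg child lcp rcp)
    (hC2 : (pvSt parent child lcp rcp L).Nodup) :
    ∀ (fuel k : Nat) (d : PySem.Dict Int Int) (wc : List Int),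
      (∀ x, x ∉ pvSeg child lcp rcp → d.get? x = none) →
      wc.length = child.length →
      (∀ i, i < child.length → wc.getD i 0 = pvStv parent child lcp rcp k i) →
      L ≤ k + fuel →
      pvLoopA parent lcp rcp (fuel + 1) wc d = pvSt parent child lcp rcp L := by
  have hstep : ∀ k, L ≤ k → pvSt parent child lcp rcp k = pvSt parent child lcp rcp L := by
    intro k hk
    unfold pvSt
    apply List.map_congr_left
    intro i hi
    rw [List.mem_range] at hi
    unfold pvStv
    by_cases hc : lcp.toNat ≤ i ∧ i < rcp.toNat
    · rw [if_pos hc, if_pos hc]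
    · rw [if_neg hc, if_neg hc, pvIter_stable_le (hL1 i hi hc) hk]
  intro fuel
  induction fuel with
  | zero =>
    intro k d wc hd hwlen hw hfuel
    obtain ⟨hget, hwc2⟩ := pvBody parent child lcp rcp h0 h1 h2 h3 hndK d hd wc k hwlen hw
    show (if pvScanDup
        (pvSubstRange rcp ((pvSubstRange 0 lcp (pvBuildDict parent lcp rcp d wc) wc).length : Int)
          (pvBuildDict parent lcp rcp d wc) (pvSubstRange 0 lcp (pvBuildDict parent lcp rcp d wc) wc))
        PySem.Set.empty = true
      then pvLoopA parent lcp rcp 0 _ _ else _) = _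
    rw [hwc2]
    have hnd1 : (pvSt parent child lcp rcp (k + 1)).Nodup := by
      rw [hstep (k + 1) (by omega)]
      exact hC2
    rw [(pvScanDup_false_iff _ _).mpr ⟨hnd1, by intro x _ hx; simp [PySem.Set.empty] at hx⟩]
    simp only [Bool.false_eq_true, if_false]
    exact hstep (k + 1) (by omega)
  | succ fuel ih =>
    intro k d wc hd hwlen hw hfuel
    obtain ⟨hget, hwc2⟩ := pvBody parent child lcp rcp h0 h1 h2 h3 hndK d hd wc k hwlen hw
    show (if pvScanDup
        (pvSubstRange rcp ((pvSubstRange 0 lcp (pvBuildDict parent lcp rcp d wc) wc).length : Int)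
          (pvBuildDict parent lcp rcp d wc) (pvSubstRange 0 lcp (pvBuildDict parent lcp rcp d wc) wc))
        PySem.Set.empty = true
      then pvLoopA parent lcp rcp (fuel + 1) _ _ else _) = _
    rw [hwc2]
    by_cases hnodup : (pvSt parent child lcp rcp (k + 1)).Nodup
    · rw [(pvScanDup_false_iff _ _).mpr ⟨hnodup, by intro x _ hx; simp [PySem.Set.empty] at hx⟩]
      simp only [Bool.false_eq_true, if_false]
      have hLle : L ≤ k + 1 := by
        by_contra hcon
        exact pvDup parent child lcp rcp h0 h1 h3 (k + 1) (hL2 (k + 1) (by omega)) hnodup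
      exact hstep (k + 1) hLle
    · have hscan : pvScanDup (pvSt parent child lcp rcp (k + 1)) PySem.Set.empty = true := by
        cases h : pvScanDup (pvSt parent child lcp rcp (k + 1)) PySem.Set.empty
        · exact absurd ((pvScanDup_false_iff _ _).mp h).1 hnodup
        · rfl
      rw [hscan]
      simp only [if_true]
      have hlt : k + 1 < L := by
        by_contra hcon
        exact hnodup (by rw [hstep (k + 1) (by omega)]; exact hC2)
      exact ih (k + 1) (pvBuildDict parent lcp rcp d wc)
        (pvSt parent child lcp rcp (k + 1))
        (fun x hx => by rw [hget x]; exact pvDm_get?_none hx)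
        (pvSt_length parent child lcp rcp (k + 1))
        (fun i hi => pvSt_getD parent child lcp rcp (k + 1) i hi)
        (by omega)

theorem pvChase_empty (x : Int) :
    pvChase PySem.Dict.empty ((PySem.Dict.empty : PySem.Dict Int Int).size + 1) x = x := by
  have h0 : (PySem.Dict.empty : PySem.Dict Int Int).size = 0 := rfl
  rw [h0]
  simp [pvChase, PySem.Dict.get?_empty]

theorem pvSetGet_self (wc : List Int) (i : Int) :
    PySem.List.pySetD wc i (PySem.List.pyGetD wc i 0) = wc := by
  simp only [PySem.List.pySetD, PySem.List.pySet?, PySem.List.pyGetD, PySem.List.pyGet?]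
  cases h : PySem.List.pyIdx? wc.length i with
  | none => simp
  | some k =>
    have hk : k < wc.length := by
      unfold PySem.List.pyIdx? at h
      split at h <;> simp_all <;> omega
    simp [h, List.getElem?_eq_getElem hk]

theorem pvChaseRange_empty (a b : Int) (wc : List Int) :
    pvChaseRange a b PySem.Dict.empty wc = wc := by
  unfold pvChaseRange
  simp only [pvChase_empty, pvSetGet_self]
  exact PySem.List.foldl_ignore _ _

theorem pvChaseRange_spec (m : PySem.Dict Int Int) :
    ∀ (cnt : Nat) (a b : Int) (wc : List Int), 0 ≤ a → cnt = (b - a).toNat →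
      b.toNat ≤ wc.length →
      (pvChaseRange a b m wc).length = wc.length ∧
      ∀ i (h : i < wc.length),
        (pvChaseRange a b m wc)[i]? =
          some (if a.toNat ≤ i ∧ i < b.toNat then pvChase m (m.size + 1) wc[i] else wc[i]) := by
  intro cnt
  induction cnt with
  | zero =>
    intro a b wc h0 hm hb
    have hnil : pvChaseRange a b m wc = wc := by
      unfold pvChaseRange
      rw [PySem.List.pyRange_one_eq_nil (by omega)]
      rfl
    rw [hnil]
    refine ⟨rfl, fun i h => ?_⟩
    rw [if_neg (by omega), List.getElem?_eq_getElem h]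
  | succ cnt ih =>
    intro a b wc h0 hm hb
    have hab : a < b := by omega
    have ha : a.toNat < wc.length := by omega
    have hstep : pvChaseRange a b m wc =
        pvChaseRange (a + 1) b m (wc.set a.toNat (pvChase m (m.size + 1) wc[a.toNat])) := by
      unfold pvChaseRange
      rw [PySem.List.pyRange_one_cons hab, List.foldl_cons,
        PySem.List.pyGetD_eq_getElem wc 0 h0 (by omega),
        PySem.List.pySetD_of_nonneg wc _ h0]
    set wc1 := wc.set a.toNat (pvChase m (m.size + 1) wc[a.toNat]) with hwc1
    have hlen1 : wc1.length = wc.length := by simp [hwc1]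
    have hget1 : ∀ i (h : i < wc.length),
        wc1[i]? = some (if i = a.toNat then pvChase m (m.size + 1) wc[a.toNat] else wc[i]) := by
      intro i h
      rw [hwc1]
      simp only [List.getElem?_set]
      by_cases hia : i = a.toNat
      · subst hia
        simp [h]
      · simp [if_neg hia, if_neg (Ne.symm hia), List.getElem?_eq_getElem h]
    obtain ⟨ihlen, ihget⟩ := ih (a + 1) b wc1 (by omega) (by omega) (by omega)
    rw [hstep]
    refine ⟨ihlen.trans hlen1, fun i h => ?_⟩
    have h1 : i < wc1.length := by omega
    rw [ihget i h1]
    have e1 := hget1 i h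
    have e1' : wc1[i] = (if i = a.toNat then pvChase m (m.size + 1) wc[a.toNat] else wc[i]) := by
      have := e1
      rw [List.getElem?_eq_getElem h1] at this
      exact Option.some.inj this
    by_cases hia : i = a.toNat
    · subst hia
      rw [if_neg (by omega), e1', if_pos rfl, if_pos (by omega)]
    · rcases Nat.lt_or_ge i a.toNat with hlt | hge
      · rw [if_neg (by omega), e1', if_neg hia, if_neg (by omega)]
      · by_cases hwin : i < b.toNat
        · rw [if_pos (by omega), e1', if_neg hia, if_pos (by omega)]
        · rw [if_neg (by omega), e1', if_neg hia, if_neg (by omega)]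

-- ---------- remaining bridges ----------

theorem pvSeg_getD (l : List Int) (lcp rcp : Int) (t : Nat)
    (ht : t < (rcp - lcp).toNat) (ht2 : lcp.toNat + t < l.length) :
    (pvSeg l lcp rcp).getD t 0 = l.getD (lcp.toNat + t) 0 := by
  rw [List.getD_eq_getElem _ 0 (by simp only [pvSeg, List.length_take, List.length_drop]; omega),
    pvSeg_getElem l lcp rcp t ht ht2, List.getD_eq_getElem l 0 ht2]

theorem pvSubstRange_empty (a b : Int) (wc : List Int) :
    pvSubstRange a b PySem.Dict.empty wc = wc := by
  unfold pvSubstRange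
  have key : ∀ (l : List Int) (wc : List Int), l.foldl (fun wc i =>
      match (PySem.Dict.empty : PySem.Dict Int Int).get? (PySem.List.pyGetD wc i 0) with
      | some v => PySem.List.pySetD wc i v
      | none => wc) wc = wc := by
    intro l
    induction l with
    | nil => intro wc; rfl
    | cons head tail ih =>
      intro wc
      rw [List.foldl_cons]
      have he : (PySem.Dict.empty : PySem.Dict Int Int).get? (PySem.List.pyGetD wc head 0) = none := by
        simp [PySem.Dict.get?_empty]
      rw [he]
      exact ih wc
  exact key _ wc

theorem pvDegenerate (parent child : List Int) (lcp rcp : Int)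
    (h21 : rcp ≤ lcp) (hnd : child.Nodup) :
    resolveDuplicateRows parent child lcp rcp = child ∧
    resolveDuplicateRows_alt parent child lcp rcp = child := by
  have hbd : pvBuildDict parent lcp rcp PySem.Dict.empty child = PySem.Dict.empty := by
    unfold pvBuildDict
    rw [PySem.List.pyRange_one_eq_nil (by omega)]
    rfl
  constructor
  · show pvLoopA parent lcp rcp (child.length + 1) child PySem.Dict.empty = child
    simp only [pvLoopA, hbd, pvSubstRange_empty]
    rw [(pvScanDup_false_iff _ _).mpr ⟨hnd, by intro x _ hx; simp [PySem.Set.empty] at hx⟩]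
    simp
  · show pvChaseRange rcp
        ((pvChaseRange 0 lcp (pvBuildDict parent lcp rcp PySem.Dict.empty child) child).length : Int)
        (pvBuildDict parent lcp rcp PySem.Dict.empty child)
        (pvChaseRange 0 lcp (pvBuildDict parent lcp rcp PySem.Dict.empty child) child) = child
    rw [hbd, pvChaseRange_empty, pvChaseRange_empty]

-- child = prefix ++ (segment ++ suffix)
theorem pvDecomp (l : List Int) (lcp rcp : Int) (h0 : 0 ≤ lcp) (h1 : lcp ≤ rcp)
    (h3 : rcp ≤ (l.length : Int)) :
    l = l.take lcp.toNat ++ (pvSeg l lcp rcp ++ l.drop rcp.toNat) := by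
  unfold pvSeg
  nth_rewrite 1 [← List.take_append_drop lcp.toNat l]
  congr 1
  nth_rewrite 1 [← List.take_append_drop ((rcp - lcp).toNat) (l.drop lcp.toNat)]
  congr 1
  rw [List.drop_drop]
  congr 1
  omega

theorem pvChildNodup_disj (child : List Int) (lcp rcp : Int) (h0 : 0 ≤ lcp)
    (h1 : lcp ≤ rcp) (h3 : rcp ≤ (child.length : Int)) (hnd : child.Nodup) :
    ∀ x ∈ pvOut child lcp rcp, x ∉ pvSeg child lcp rcp := by
  intro x hx hK
  have hnd' := (pvDecomp child lcp rcp h0 h1 h3) ▸ hnd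
  rw [List.nodup_append] at hnd'
  obtain ⟨-, hrest, hdisj⟩ := hnd'
  rw [List.nodup_append] at hrest
  obtain ⟨-, -, hdisj2⟩ := hrest
  unfold pvOut at hx
  rcases List.mem_append.mp hx with h | h
  · exact hdisj x h x (List.mem_append_left _ hK) rfl
  · exact hdisj2 x hK x h rfl

-- ---------- B evaluates to the stable state ----------

theorem pvAlt_eq (parent child : List Int) (lcp rcp : Int)
    (h0 : 0 ≤ lcp) (h1 : lcp ≤ rcp) (h2 : rcp ≤ (parent.length : Int))
    (h3 : rcp ≤ (child.length : Int)) (hndK : (pvSeg child lcp rcp).Nodup) (L : Nat)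
    (hL1 : ∀ i, i < child.length → ¬(lcp.toNat ≤ i ∧ i < rcp.toNat) →
      (pvF (pvSeg child lcp rcp) (pvSeg parent lcp rcp))^[L] (child.getD i 0) ∉ pvSeg child lcp rcp)
    (HC1 : ∀ i, i < child.length → ¬(lcp.toNat ≤ i ∧ i < rcp.toNat) →
      ∃ k ≤ (pvSeg child lcp rcp).length,
        (pvF (pvSeg child lcp rcp) (pvSeg parent lcp rcp))^[k] (child.getD i 0) ∉ pvSeg child lcp rcp) :
    resolveDuplicateRows_alt parent child lcp rcp = pvSt parent child lcp rcp L := by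
  have hlenKP : (pvSeg child lcp rcp).length = (pvSeg parent lcp rcp).length := by
    rw [pvSeg_length child lcp rcp h0 h3, pvSeg_length parent lcp rcp h0 h2]
  have hmap : pvBuildDict parent lcp rcp PySem.Dict.empty child =
      pvZipIns (pvSeg child lcp rcp) (pvSeg parent lcp rcp) PySem.Dict.empty :=
    pvBuildDict_eq ((rcp - lcp).toNat) lcp rcp _ parent child h0 rfl h2 h3
  have hsize : (pvZipIns (pvSeg child lcp rcp) (pvSeg parent lcp rcp) PySem.Dict.empty).size =
      (pvSeg child lcp rcp).length := by
    have hitems := PySem.Dict.items_foldl_insert_fresh (k := Prod.fst) (v := Prod.snd)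
      ((pvSeg child lcp rcp).zip (pvSeg parent lcp rcp)) PySem.Dict.empty
      (fun a _ => PySem.Dict.contains_empty a.1)
      (by rw [List.map_fst_zip (le_of_eq hlenKP)]; exact hndK)
    show (pvZipIns (pvSeg child lcp rcp) (pvSeg parent lcp rcp) PySem.Dict.empty).items.length =
      (pvSeg child lcp rcp).length
    rw [show (pvZipIns (pvSeg child lcp rcp) (pvSeg parent lcp rcp) PySem.Dict.empty).items =
        (PySem.Dict.empty : PySem.Dict Int Int).items ++
          (((pvSeg child lcp rcp).zip (pvSeg parent lcp rcp)).map (fun a => (a.1, a.2))) from hitems]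
    simp [show (PySem.Dict.empty : PySem.Dict Int Int).items = [] from rfl, List.length_zip, hlenKP]
  show pvChaseRange rcp
      ((pvChaseRange 0 lcp (pvBuildDict parent lcp rcp PySem.Dict.empty child) child).length : Int)
      (pvBuildDict parent lcp rcp PySem.Dict.empty child)
      (pvChaseRange 0 lcp (pvBuildDict parent lcp rcp PySem.Dict.empty child) child) =
    pvSt parent child lcp rcp L
  rw [hmap]
  obtain ⟨len1, get1⟩ := pvChaseRange_spec
    (pvZipIns (pvSeg child lcp rcp) (pvSeg parent lcp rcp) PySem.Dict.empty)
    lcp.toNat 0 lcp child (le_refl 0) (by omega) (by omega)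
  obtain ⟨len2, get2⟩ := pvChaseRange_spec
    (pvZipIns (pvSeg child lcp rcp) (pvSeg parent lcp rcp) PySem.Dict.empty)
    ((((pvChaseRange 0 lcp (pvZipIns (pvSeg child lcp rcp) (pvSeg parent lcp rcp) PySem.Dict.empty) child).length : Int)) - rcp).toNat
    rcp ((pvChaseRange 0 lcp (pvZipIns (pvSeg child lcp rcp) (pvSeg parent lcp rcp) PySem.Dict.empty) child).length : Int)
    (pvChaseRange 0 lcp (pvZipIns (pvSeg child lcp rcp) (pvSeg parent lcp rcp) PySem.Dict.empty) child)
    (by omega) rfl (by simp)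
  apply pvEqSt parent child lcp rcp _ L (by omega)
  intro i hi
  have hi2 : i < (pvChaseRange 0 lcp (pvZipIns (pvSeg child lcp rcp) (pvSeg parent lcp rcp) PySem.Dict.empty) child).length := by omega
  have e1 : (pvChaseRange 0 lcp (pvZipIns (pvSeg child lcp rcp) (pvSeg parent lcp rcp) PySem.Dict.empty) child)[i]'hi2 =
      (if i < lcp.toNat
        then pvChase (pvZipIns (pvSeg child lcp rcp) (pvSeg parent lcp rcp) PySem.Dict.empty)
          ((pvZipIns (pvSeg child lcp rcp) (pvSeg parent lcp rcp) PySem.Dict.empty).size + 1) child[i]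
        else child[i]) := by
    have hg := get1 i hi
    rw [List.getElem?_eq_getElem hi2] at hg
    have e := Option.some.inj hg
    rw [e]
    by_cases hc : i < lcp.toNat
    · rw [if_pos (by omega), if_pos hc]
    · rw [if_neg (by omega), if_neg hc]
  have e2' := get2 i hi2
  rw [List.getElem?_eq_getElem (by omega : i <
    (pvChaseRange rcp ((pvChaseRange 0 lcp (pvZipIns (pvSeg child lcp rcp) (pvSeg parent lcp rcp) PySem.Dict.empty) child).length : Int)
      (pvZipIns (pvSeg child lcp rcp) (pvSeg parent lcp rcp) PySem.Dict.empty)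
      (pvChaseRange 0 lcp (pvZipIns (pvSeg child lcp rcp) (pvSeg parent lcp rcp) PySem.Dict.empty) child)).length)] at e2'
  have e2 := Option.some.inj e2'
  rw [List.getD_eq_getElem _ 0 (by omega), e2]
  have hchase : ∀ _ : ¬(lcp.toNat ≤ i ∧ i < rcp.toNat),
      pvChase (pvZipIns (pvSeg child lcp rcp) (pvSeg parent lcp rcp) PySem.Dict.empty)
        ((pvZipIns (pvSeg child lcp rcp) (pvSeg parent lcp rcp) PySem.Dict.empty).size + 1) child[i] =
      (pvF (pvSeg child lcp rcp) (pvSeg parent lcp rcp))^[L] (child.getD i 0) := by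
    intro hx
    rw [hsize]
    obtain ⟨kx, hkx, hko⟩ := HC1 i hi hx
    obtain ⟨k0, hcs, hk0⟩ := pvChase_spec hndK hlenKP ((pvSeg child lcp rcp).length + 1)
      (child.getD i 0) ⟨kx, by omega, hko⟩
    rw [show (child[i]'hi : Int) = child.getD i 0 from (List.getD_eq_getElem child 0 hi).symm, hcs]
    rcases Nat.le_total k0 L with hle | hle
    · exact (pvIter_stable_le hk0 hle).symm
    · exact pvIter_stable_le (hL1 i hi hx) hle
  unfold pvStv
  by_cases hseg' : lcp.toNat ≤ i ∧ i < rcp.toNat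
  · rw [if_pos hseg', if_neg (by omega), e1, if_neg (by omega),
      List.getD_eq_getElem child 0 hi]
  · rw [if_neg hseg']
    rcases Nat.lt_or_ge i lcp.toNat with hlt | hge
    · rw [if_neg (by omega), e1, if_pos hlt, hchase hseg']
    · rw [if_pos (by constructor <;> omega), e1, if_neg (by omega), hchase hseg']

-- ===== VERDICT (by name: the statement is the Claim_ definition above) =====
theorem resolveDuplicateRows_spec : Claim_equal_resolveDuplicateRows := by
  unfold Claim_equal_resolveDuplicateRows
  intro parent child lcp rcp hdom hpre
  unfold Spec_resolveDuplicateRows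
  rcases hpre with ⟨hr, h21, h1n, hnd⟩ | ⟨h0, h1, h2, h3, hbr⟩
  · obtain ⟨ha, hb⟩ := pvDegenerate parent child lcp rcp h21 hnd
    rw [ha, hb]
  · have hndK : (pvSeg child lcp rcp).Nodup := by
      rcases hbr with hnd | hpmx
      · exact hnd.sublist ((List.take_sublist _ _).trans (List.drop_sublist _ _))
      · exact hpmx.1
    have hlenKP : (pvSeg child lcp rcp).length = (pvSeg parent lcp rcp).length := by
      rw [pvSeg_length child lcp rcp h0 h3, pvSeg_length parent lcp rcp h0 h2]
    have hsl := pvSeg_length child lcp rcp h0 h3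
    have HC1 : ∀ i, i < child.length → ¬(lcp.toNat ≤ i ∧ i < rcp.toNat) →
        ∃ k ≤ (pvSeg child lcp rcp).length,
          (pvF (pvSeg child lcp rcp) (pvSeg parent lcp rcp))^[k] (child.getD i 0) ∉
            pvSeg child lcp rcp := by
      intro i hi ho
      rcases hbr with hnd | hpmx
      · have hx := pvChildNodup_disj child lcp rcp h0 h1 h3 hnd _
          (pvOut_mem child lcp rcp h0 h1 h3 i hi ho)
        exact ⟨0, Nat.zero_le _, by simpa using hx⟩
      · exact pvChain_exit hndK hpmx.2.1 hlenKP
          (hpmx.2.2.2 _ (pvOut_mem child lcp rcp h0 h1 h3 i hi ho))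
    have hglob : ∀ i, i < child.length → ¬(lcp.toNat ≤ i ∧ i < rcp.toNat) →
        (pvF (pvSeg child lcp rcp) (pvSeg parent lcp rcp))^[(pvSeg child lcp rcp).length]
          (child.getD i 0) ∉ pvSeg child lcp rcp := by
      intro i hi ho
      obtain ⟨kx, hkx, hko⟩ := HC1 i hi ho
      rwa [pvIter_stable_le hko hkx]
    have hexL : ∃ k, ∀ i, i < child.length → ¬(lcp.toNat ≤ i ∧ i < rcp.toNat) →
        (pvF (pvSeg child lcp rcp) (pvSeg parent lcp rcp))^[k] (child.getD i 0) ∉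
          pvSeg child lcp rcp := ⟨(pvSeg child lcp rcp).length, hglob⟩
    have hL1 := Nat.find_spec hexL
    have hLle : Nat.find hexL ≤ (pvSeg child lcp rcp).length := Nat.find_min' hexL hglob
    have hL2 : ∀ k, k < Nat.find hexL → ∃ i, i < child.length ∧
        ¬(lcp.toNat ≤ i ∧ i < rcp.toNat) ∧
        (pvF (pvSeg child lcp rcp) (pvSeg parent lcp rcp))^[k] (child.getD i 0) ∈
          pvSeg child lcp rcp := by
      intro k hk
      have hmin := Nat.find_min hexL hk
      push_neg at hmin
      obtain ⟨i, hi, ho, hmem⟩ := hmin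
      exact ⟨i, hi, fun hand => by have := ho hand.1; omega, hmem⟩
    have hC2 : (pvSt parent child lcp rcp (Nat.find hexL)).Nodup := by
      rcases hbr with hnd | hpmx
      · have hfix : pvSt parent child lcp rcp (Nat.find hexL) = child := by
          refine (pvEqSt parent child lcp rcp child (Nat.find hexL) rfl ?_).symm
          intro i hi
          unfold pvStv
          split
          · rfl
          · rename_i ho
            have hx := pvChildNodup_disj child lcp rcp h0 h1 h3 hnd _
              (pvOut_mem child lcp rcp h0 h1 h3 i hi ho)
            rw [pvIter_stable_le (k := 0) (by simpa using hx) (Nat.zero_le _)]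
            simp
        rw [hfix]
        exact hnd
      · unfold pvSt
        refine List.Nodup.map_on ?_ List.nodup_range
        intro i hi j hj heq
        rw [List.mem_range] at hi hj
        have hKval : ∀ t, t < child.length → lcp.toNat ≤ t ∧ t < rcp.toNat →
            (pvSeg child lcp rcp).getD (t - lcp.toNat) 0 = child.getD t 0 := by
          intro t ht hct
          rw [pvSeg_getD child lcp rcp (t - lcp.toNat) (by omega) (by omega),
            show lcp.toNat + (t - lcp.toNat) = t from by omega]
        have hKmem : ∀ t, t < child.length → lcp.toNat ≤ t ∧ t < rcp.toNat →
            child.getD t 0 ∈ pvSeg child lcp rcp := by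
          intro t ht hct
          rw [← hKval t ht hct,
            List.getD_eq_getElem _ 0 (by rw [hsl]; omega)]
          exact List.getElem_mem _
        by_cases hci : lcp.toNat ≤ i ∧ i < rcp.toNat <;>
          by_cases hcj : lcp.toNat ≤ j ∧ j < rcp.toNat
        · -- both in the segment
          unfold pvStv at heq
          rw [if_pos hci, if_pos hcj] at heq
          have e1 := hKval i hi hci
          have e2 := hKval j hj hcj
          have hK1 : (pvSeg child lcp rcp)[i - lcp.toNat]'(by rw [hsl]; omega) =
              (pvSeg child lcp rcp)[j - lcp.toNat]'(by rw [hsl]; omega) := by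
            rw [← List.getD_eq_getElem _ 0 (by rw [hsl]; omega),
              ← List.getD_eq_getElem _ 0 (by rw [hsl]; omega), e1, e2, heq]
          have := hndK.getElem_inj_iff.mp hK1
          omega
        · -- segment / outside: value in K equals a chased value not in K
          unfold pvStv at heq
          rw [if_pos hci, if_neg hcj] at heq
          exact absurd (heq ▸ hKmem i hi hci) (hL1 j hj hcj)
        · unfold pvStv at heq
          rw [if_neg hci, if_pos hcj] at heq
          exact absurd (heq.symm ▸ hKmem j hj hcj) (hL1 i hi hci)
        · -- both outside: walk the chains backwards
          unfold pvStv at heq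
          rw [if_neg hci, if_neg hcj] at heq
          have hoi := pvOut_mem child lcp rcp h0 h1 h3 i hi hci
          have hoj := pvOut_mem child lcp rcp h0 h1 h3 j hj hcj
          have hpi : child.getD i 0 ∉ pvSeg parent lcp rcp := hpmx.2.2.2 _ hoi
          have hpj : child.getD j 0 ∉ pvSeg parent lcp rcp := hpmx.2.2.2 _ hoj
          have hex_i : ∃ k, (pvF (pvSeg child lcp rcp) (pvSeg parent lcp rcp))^[k]
              (child.getD i 0) ∉ pvSeg child lcp rcp := ⟨_, hL1 i hi hci⟩
          have hex_j : ∃ k, (pvF (pvSeg child lcp rcp) (pvSeg parent lcp rcp))^[k]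
              (child.getD j 0) ∉ pvSeg child lcp rcp := ⟨_, hL1 j hj hcj⟩
          have hki1 := Nat.find_spec hex_i
          have hkj1 := Nat.find_spec hex_j
          have hki2 : ∀ t, t < Nat.find hex_i →
              (pvF (pvSeg child lcp rcp) (pvSeg parent lcp rcp))^[t] (child.getD i 0) ∈
                pvSeg child lcp rcp :=
            fun t ht => not_not.mp (Nat.find_min hex_i ht)
          have hkj2 : ∀ t, t < Nat.find hex_j →
              (pvF (pvSeg child lcp rcp) (pvSeg parent lcp rcp))^[t] (child.getD j 0) ∈
                pvSeg child lcp rcp :=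
            fun t ht => not_not.mp (Nat.find_min hex_j ht)
          have hkiL : Nat.find hex_i ≤ Nat.find hexL := Nat.find_min' hex_i (hL1 i hi hci)
          have hkjL : Nat.find hex_j ≤ Nat.find hexL := Nat.find_min' hex_j (hL1 j hj hcj)
          have heq' : (pvF (pvSeg child lcp rcp) (pvSeg parent lcp rcp))^[Nat.find hex_i]
              (child.getD i 0) =
              (pvF (pvSeg child lcp rcp) (pvSeg parent lcp rcp))^[Nat.find hex_j]
              (child.getD j 0) := by
            rw [← pvIter_stable_le hki1 hkiL, ← pvIter_stable_le hkj1 hkjL]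
            exact heq
          have hxeq : child.getD i 0 = child.getD j 0 :=
            pvChain_backward hndK hpmx.2.1 hlenKP hpi hpj hki2 hkj2 heq'
          exact pvOut_inj child lcp rcp h0 h1 h3 hpmx.2.2.1 i j hi hj hci hcj
            (by rw [← List.getD_eq_getElem child 0 hi, ← List.getD_eq_getElem child 0 hj]
                exact hxeq)
    have hAeq : resolveDuplicateRows parent child lcp rcp =
        pvSt parent child lcp rcp (Nat.find hexL) := by
      show pvLoopA parent lcp rcp (child.length + 1) child PySem.Dict.empty = _
      exact pvLoop_main parent child lcp rcp h0 h1 h2 h3 hndK (Nat.find hexL) hL1 hL2 hC2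
        child.length 0 PySem.Dict.empty child
        (fun x _ => by simp [PySem.Dict.get?_empty]) rfl
        (fun i hi => by unfold pvStv; split <;> simp) (by omega)
    have hBeq := pvAlt_eq parent child lcp rcp h0 h1 h2 h3 hndK (Nat.find hexL) hL1 HC1
    rw [hAeq, hBeq]
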